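-- pv_equiv track=rewrite | github.com/liupengsay/Algorithm | src/mathmatics/number_theory/problem.py | lc_6334
-- ===== SOURCE A (Python) =====
-- import math
-- from collections import Counter
-- from collections import defaultdict
-- from typing import List
--
-- def lc_6334(nums: List[int]) -> int:
--     # 非空子集乘积不含除 1 之外任何平方整除数，即乘积质数因子的幂次均为 1（bag_dp|counter）
--     dct = {2, 3, 5, 6, 7, 10, 11, 13, 14, 15, 17, 19, 21, 22, 23, 26, 29, 30}
--     # 集合为质数因子幂次均为 1
--     mod = 10 ** 9 + 7
--     cnt = Counter(nums)
--     pre = defaultdict(int)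
--     for num in cnt:
--         if num in dct:
--             cur = pre.copy()
--             for p in pre:
--                 if math.gcd(p, num) == 1:
--                     cur[p * num] += pre[p] * cnt[num]
--                     cur[p * num] %= mod
--             cur[num] += cnt[num]
--             pre = cur.copy()
--     # 1 需要特殊处理
--     p = pow(2, cnt[1], mod)
--     ans = sum(pre.values()) * p
--     ans += p - 1
--     return ans % mod
-- ===== SOURCE B (Python) =====
-- import math
-- from collections import Counter
-- from typing import List
--
-- _SQUAREFREE = frozenset({2, 3, 5, 6, 7, 10, 11, 13, 14, 15, 17, 19, 21, 22, 23, 26, 29, 30})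
-- _MOD = 10 ** 9 + 7
--
-- def lc_6334(nums: List[int]) -> int:
--     # DFS over the distinct squarefree values: each branch either skips a value or,
--     # when it is coprime to the product chosen so far, takes it (weighted by its count).
--     cnt = Counter(nums)
--     items = [(x, c) for x, c in cnt.items() if x in _SQUAREFREE]
--
--     def dfs(i: int, q: int) -> int:
--         if i == len(items):
--             return 1
--         r = dfs(i + 1, q)
--         x, c = items[i]
--         if math.gcd(q, x) == 1:
--             r = (r + c * dfs(i + 1, q * x)) % _MOD
--         return r
--
--     p2 = pow(2, cnt[1], _MOD)
--     total = dfs(0, 1) - 1  # nonempty selections among the values > 1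
--     return (total * p2 + p2 - 1) % _MOD
-- ===== Notes on version B (the rewrite author's own statement) =====
-- stated objective: alternative
-- what changed: A's product-keyed dict bag-DP (copy the dict per value, combine coprime product keys by gcd) is replaced by a direct take-or-skip DFS recursion over the (at most 18) distinct squarefree values present, pruned by coprimality with the running product.
import Mathlib
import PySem

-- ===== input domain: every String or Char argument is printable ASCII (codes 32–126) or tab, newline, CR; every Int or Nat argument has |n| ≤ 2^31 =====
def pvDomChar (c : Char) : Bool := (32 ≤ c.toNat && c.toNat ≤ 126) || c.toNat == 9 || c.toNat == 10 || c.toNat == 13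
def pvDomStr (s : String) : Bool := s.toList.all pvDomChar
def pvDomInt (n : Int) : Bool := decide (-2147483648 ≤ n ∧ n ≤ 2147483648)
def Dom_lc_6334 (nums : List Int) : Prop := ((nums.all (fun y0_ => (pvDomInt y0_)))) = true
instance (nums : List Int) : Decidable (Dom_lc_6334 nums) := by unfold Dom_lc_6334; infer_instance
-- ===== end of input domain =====

-- B replaces A's product-keyed dict bag-DP by a direct DFS recursion over the distinct
-- squarefree values (take-or-skip, pruned by coprimality); objective: alternative.

-- ===== PORT A =====
def pvModA : Int := 1000000007

def pvDctA : List Int := PySem.Set.ofList [2, 3, 5, 6, 7, 10, 11, 13, 14, 15, 17, 19, 21, 22, 23, 26, 29, 30]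

-- 'cur = pre.copy(); for p in pre: ...' — fold over pre's keys mutating cur, reading pre
def pvInnerA (cnt : PySem.Dict Int Int) (num : Int) (pre : PySem.Dict Int Int) : PySem.Dict Int Int :=
  pre.keys.foldl (fun cur p =>
    if Int.gcd p num == 1 then
      let cur1 := cur.insert (p * num) (cur.getD (p * num) 0 + pre.getD p 0 * cnt.getD num 0)
      cur1.insert (p * num) (PySem.Int.mod (cur1.getD (p * num) 0) pvModA)
    else cur) pre

def lc_6334 (nums : List Int) : Int :=
  let cnt := PySem.Dict.counter nums
  let pre := cnt.keys.foldl (fun pre num =>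
    if pvDctA.contains num then
      let cur := pvInnerA cnt num pre
      cur.insert num (cur.getD num 0 + cnt.getD num 0)
    else pre) PySem.Dict.empty
  let p := PySem.Int.powMod 2 (cnt.getD 1 0).toNat pvModA
  let ans := pre.values.sum * p
  let ans := ans + p - 1
  PySem.Int.mod ans pvModA

-- ===== PORT B =====
def pvSqfB : List Int := PySem.Set.ofList [2, 3, 5, 6, 7, 10, 11, 13, 14, 15, 17, 19, 21, 22, 23, 26, 29, 30]

-- Source B's dfs(i, q) over items[i:], as structural recursion on the remaining items
def pvDfsB : List (Int × Int) → Int → Int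
  | [], _ => 1
  | (x, c) :: rest, q =>
    let r := pvDfsB rest q
    if Int.gcd q x == 1 then PySem.Int.mod (r + c * pvDfsB rest (q * x)) pvModA else r

def lc_6334_alt (nums : List Int) : Int :=
  let cnt := PySem.Dict.counter nums
  let items := cnt.items.filter (fun xc => pvSqfB.contains xc.1)
  let p2 := PySem.Int.powMod 2 (cnt.getD 1 0).toNat pvModA
  let total := pvDfsB items 1 - 1
  PySem.Int.mod (total * p2 + p2 - 1) pvModA

-- ===== PRECONDITION & SPEC =====
def Spec_lc_6334 (nums : List Int) (out : Int) : Prop := out = lc_6334_alt nums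
instance (nums : List Int) (out : Int) : Decidable (Spec_lc_6334 nums out) := by unfold Spec_lc_6334; infer_instance

-- ===== CLAIM (what is proved, stated in full; the proofs are below) =====
def Claim_equal_lc_6334 : Prop := ∀ (nums : List Int), Dom_lc_6334 nums → Spec_lc_6334 nums (lc_6334 nums)

-- ===== LEMMAS AND PROOFS =====

-- weighted sum of a dict's items: Σ v * f k
def pvW (f : Int → Int) (l : List (Int × Int)) : Int := (l.map (fun kv => kv.2 * f kv.1)).sum

-- A's per-value dict update, with cnt reads already resolved to the pair's count
def pvStep (x c : Int) (pre : PySem.Dict Int Int) : PySem.Dict Int Int :=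
  let cur := pre.items.foldl (fun cur kv =>
    if Int.gcd kv.1 x == 1 then
      let cur1 := cur.insert (kv.1 * x) (cur.getD (kv.1 * x) 0 + kv.2 * c)
      cur1.insert (kv.1 * x) (PySem.Int.mod (cur1.getD (kv.1 * x) 0) pvModA)
    else cur) pre
  cur.insert x (cur.getD x 0 + c)

def pvOuter (L : List (Int × Int)) (d : PySem.Dict Int Int) : PySem.Dict Int Int :=
  L.foldl (fun pre kv => if pvSqfB.contains kv.1 then pvStep kv.1 kv.2 pre else pre) d




theorem pvFoldlCongrInv {α β : Type} (P : α → Prop) (f g : α → β → α) (l : List β) (init : α)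
    (hinit : P init) (hpres : ∀ a b, P a → b ∈ l → P (f a b))
    (hc : ∀ a b, P a → b ∈ l → f a b = g a b) : l.foldl f init = l.foldl g init := by
  induction l generalizing init with
  | nil => rfl
  | cons b t ih =>
    simp only [List.foldl_cons]
    rw [← hc init b hinit (List.mem_cons_self ..)]
    exact ih (f init b) (hpres init b hinit (List.mem_cons_self ..))
      (fun a x ha hx => hpres a x ha (List.mem_cons_of_mem _ hx))
      (fun a x ha hx => hc a x ha (List.mem_cons_of_mem _ hx))

theorem pvW_append (f : Int → Int) (l1 l2 : List (Int × Int)) :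
    pvW f (l1 ++ l2) = pvW f l1 + pvW f l2 := by
  simp [pvW]

theorem pvW_mapReplace (f : Int → Int) (k v : Int) :
    ∀ (l : List (Int × Int)), (l.map Prod.fst).Nodup → ∀ w, (k, w) ∈ l →
      pvW f (l.map (fun p => if p.1 == k then (k, v) else p)) = pvW f l + (v - w) * f k := by
  intro l
  induction l with
  | nil => intro _ w hw; cases hw
  | cons p t ih =>
    intro hnd w hw
    simp only [List.map_cons, List.nodup_cons] at hnd
    rcases List.mem_cons.mp hw with h | h
    · subst h
      have ht : t.map (fun p => if p.1 == k then (k, v) else p) = t := by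
        have h1 : ∀ x ∈ t, (if x.1 == k then (k, v) else x) = id x := by
          intro x hx
          have hne : x.1 ≠ k := by
            intro he
            exact hnd.1 (he ▸ (List.mem_map_of_mem hx : x.1 ∈ t.map Prod.fst))
          simp [hne]
        rw [List.map_congr_left h1, List.map_id]
      simp only [pvW, List.map_cons, List.sum_cons, ht, beq_self_eq_true, if_true]
      ring
    · have hne : p.1 ≠ k := by
        intro he
        exact hnd.1 (he ▸ (List.mem_map_of_mem h : (k, w).1 ∈ t.map Prod.fst))
      have hb : (p.1 == k) = false := by simpa using hne
      have := ih hnd.2 w h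
      simp only [pvW] at this ⊢
      simp only [List.map_cons, List.sum_cons, hb, Bool.false_eq_true, if_false]
      rw [this]; ring

theorem pvW_insert (f : Int → Int) (d : PySem.Dict Int Int) (h : d.keys.Nodup) (k v : Int) :
    pvW f (d.insert k v).items = pvW f d.items + (v - d.getD k 0) * f k := by
  by_cases hc : d.contains k = true
  · obtain ⟨w, hw⟩ : ∃ w, (k, w) ∈ d.items := by
      have hk : k ∈ d.keys := (PySem.Dict.contains_iff_mem_keys d k).mp hc
      simp only [PySem.Dict.keys, List.mem_map] at hk
      obtain ⟨⟨k1, v1⟩, hp, he⟩ := hk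
      simp only at he
      subst he
      exact ⟨v1, hp⟩
    rw [PySem.Dict.items_insert_of_contains d v hc,
        PySem.Dict.getD_of_mem_items d hw h]
    exact pvW_mapReplace f k v d.items h w hw
  · have hc' : d.contains k = false := by simpa using hc
    rw [PySem.Dict.items_insert_of_not_contains d v hc',
        PySem.Dict.getD_of_not_contains d 0 hc', pvW_append]
    simp [pvW]

theorem pvNodupFold {β : Type} (f : PySem.Dict Int Int → β → PySem.Dict Int Int)
    (hf : ∀ d b, d.keys.Nodup → (f d b).keys.Nodup) :
    ∀ (l : List β) (d : PySem.Dict Int Int), d.keys.Nodup → (l.foldl f d).keys.Nodup := by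
  intro l
  induction l with
  | nil => intro d h; exact h
  | cons b t ih => intro d h; exact ih (f d b) (hf d b h)

theorem pvNodupInnerStep (x c : Int) (cur : PySem.Dict Int Int) (kv : Int × Int)
    (h : cur.keys.Nodup) :
    ((fun cur (kv : Int × Int) =>
      if Int.gcd kv.1 x == 1 then
        let cur1 := cur.insert (kv.1 * x) (cur.getD (kv.1 * x) 0 + kv.2 * c)
        cur1.insert (kv.1 * x) (PySem.Int.mod (cur1.getD (kv.1 * x) 0) pvModA)
      else cur) cur kv).keys.Nodup := by
  by_cases hg : (Int.gcd kv.1 x == 1) = true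
  · simp only [hg, if_true]
    exact PySem.Dict.nodup_keys_insert _ _ _ (PySem.Dict.nodup_keys_insert _ _ _ h)
  · simp only [hg, Bool.false_eq_true, if_false]
    exact h

theorem pvNodupStep (x c : Int) (pre : PySem.Dict Int Int) (h : pre.keys.Nodup) :
    (pvStep x c pre).keys.Nodup := by
  unfold pvStep
  exact PySem.Dict.nodup_keys_insert _ _ _
    (pvNodupFold _ (fun d b hd => pvNodupInnerStep x c d b hd) pre.items pre h)

theorem pvInnerA_eq (cnt : PySem.Dict Int Int) (num : Int) (pre : PySem.Dict Int Int)
    (h : pre.keys.Nodup) :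
    pvInnerA cnt num pre = pre.items.foldl (fun cur kv =>
      if Int.gcd kv.1 num == 1 then
        let cur1 := cur.insert (kv.1 * num) (cur.getD (kv.1 * num) 0 + kv.2 * cnt.getD num 0)
        cur1.insert (kv.1 * num) (PySem.Int.mod (cur1.getD (kv.1 * num) 0) pvModA)
      else cur) pre := by
  unfold pvInnerA
  simp only [PySem.Dict.keys]
  rw [List.foldl_map]
  apply PySem.List.foldl_congr_mem'
  intro kv hkv cur
  have hv : pre.getD kv.1 0 = kv.2 :=
    PySem.Dict.getD_of_mem_items pre (by simpa using hkv) h 0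
  simp only [hv]

theorem pvInnerA_nodup (cnt : PySem.Dict Int Int) (num : Int) (pre : PySem.Dict Int Int)
    (h : pre.keys.Nodup) : (pvInnerA cnt num pre).keys.Nodup := by
  rw [pvInnerA_eq cnt num pre h]
  exact pvNodupFold _ (fun d b hd => pvNodupInnerStep num (cnt.getD num 0) d b hd) pre.items pre h

theorem pvOuterA_eq (cnt : PySem.Dict Int Int) (hnd : cnt.keys.Nodup) (d : PySem.Dict Int Int)
    (hd : d.keys.Nodup) :
    cnt.keys.foldl (fun pre num =>
      if pvDctA.contains num then
        let cur := pvInnerA cnt num pre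
        cur.insert num (cur.getD num 0 + cnt.getD num 0)
      else pre) d = pvOuter cnt.items d := by
  unfold pvOuter
  simp only [PySem.Dict.keys]
  rw [List.foldl_map]
  apply pvFoldlCongrInv (fun pre => pre.keys.Nodup)
  · exact hd
  · intro pre kv hpre _
    by_cases hc : pvDctA.contains kv.1 = true
    · simp only [hc, if_true]
      exact PySem.Dict.nodup_keys_insert _ _ _ (pvInnerA_nodup cnt kv.1 pre hpre)
    · simp only [hc, Bool.false_eq_true, if_false]
      exact hpre
  · intro pre kv hpre hkv
    have hAB : pvDctA = pvSqfB := rfl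
    rw [hAB]
    by_cases hc : pvSqfB.contains kv.1 = true
    · simp only [hc, if_true]
      have hv : cnt.getD kv.1 0 = kv.2 :=
        PySem.Dict.getD_of_mem_items cnt (by simpa using hkv) hnd 0
      rw [pvInnerA_eq cnt kv.1 pre hpre]
      simp only [hv, pvStep]
    · simp only [hc, Bool.false_eq_true, if_false]

theorem pvModA_pos : (0:Int) < pvModA := by norm_num [pvModA]

theorem pvModEq_mod (t : Int) : Int.ModEq pvModA (PySem.Int.mod t pvModA) t := by
  rw [PySem.Int.mod_eq_emod_of_pos pvModA_pos]
  show (t % pvModA) % pvModA = t % pvModA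
  exact Int.emod_emod_of_dvd t dvd_rfl

theorem pvSumModEq (n : Int) (F G : (Int × Int) → Int) :
    ∀ (l : List (Int × Int)), (∀ p ∈ l, Int.ModEq n (F p) (G p)) →
      Int.ModEq n (l.map F).sum (l.map G).sum := by
  intro l
  induction l with
  | nil => intro _; rfl
  | cons p t ih =>
    intro h
    simp only [List.map_cons, List.sum_cons]
    exact (h p (List.mem_cons_self ..)).add (ih (fun q hq => h q (List.mem_cons_of_mem _ hq)))

theorem pvW_innerFold (f : Int → Int) (x c : Int) :
    ∀ (l : List (Int × Int)) (cur : PySem.Dict Int Int), cur.keys.Nodup →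
      Int.ModEq pvModA
        (pvW f ((l.foldl (fun cur (kv : Int × Int) =>
          if Int.gcd kv.1 x == 1 then
            let cur1 := cur.insert (kv.1 * x) (cur.getD (kv.1 * x) 0 + kv.2 * c)
            cur1.insert (kv.1 * x) (PySem.Int.mod (cur1.getD (kv.1 * x) 0) pvModA)
          else cur) cur).items))
        (pvW f cur.items
          + (l.map (fun kv => kv.2 * (if Int.gcd kv.1 x == 1 then c * f (kv.1 * x) else 0))).sum) := by
  intro l
  induction l with
  | nil => intro cur _; simp
  | cons kv t ih =>
    intro cur hnd
    simp only [List.foldl_cons, List.map_cons, List.sum_cons]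
    by_cases hg : (Int.gcd kv.1 x == 1) = true
    · simp only [hg, if_true]
      set K := kv.1 * x with hK
      set t1 := cur.getD K 0 + kv.2 * c with ht1
      have hnd1 : (cur.insert K t1).keys.Nodup := PySem.Dict.nodup_keys_insert _ _ _ hnd
      have hnd2 : ((cur.insert K t1).insert K (PySem.Int.mod ((cur.insert K t1).getD K 0) pvModA)).keys.Nodup :=
        PySem.Dict.nodup_keys_insert _ _ _ hnd1
      have hIH := ih ((cur.insert K t1).insert K (PySem.Int.mod ((cur.insert K t1).getD K 0) pvModA)) hnd2
      refine hIH.trans ?_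
      have e1 : pvW f ((cur.insert K t1).insert K (PySem.Int.mod ((cur.insert K t1).getD K 0) pvModA)).items
          = pvW f (cur.insert K t1).items
            + (PySem.Int.mod ((cur.insert K t1).getD K 0) pvModA - (cur.insert K t1).getD K 0) * f K :=
        pvW_insert f _ hnd1 _ _
      have e2 : pvW f (cur.insert K t1).items = pvW f cur.items + (t1 - cur.getD K 0) * f K :=
        pvW_insert f _ hnd _ _
      have e3 : (cur.insert K t1).getD K 0 = t1 := by
        rw [PySem.Dict.getD_insert_self]
      have hm : Int.ModEq pvModA (PySem.Int.mod t1 pvModA - t1) 0 :=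
        (pvModEq_mod t1).sub_right t1 |>.trans (by simp)
      rw [e1, e2, e3, ht1]
      have expand : pvW f cur.items + (cur.getD K 0 + kv.2 * c - cur.getD K 0) * f K
            + (PySem.Int.mod (cur.getD K 0 + kv.2 * c) pvModA - (cur.getD K 0 + kv.2 * c)) * f K
            + (List.map (fun kv => kv.2 * (if (Int.gcd kv.1 x == 1) = true then c * f (kv.1 * x) else 0)) t).sum
          = (pvW f cur.items + (kv.2 * (c * f K)
              + (List.map (fun kv => kv.2 * (if (Int.gcd kv.1 x == 1) = true then c * f (kv.1 * x) else 0)) t).sum))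
            + (PySem.Int.mod (cur.getD K 0 + kv.2 * c) pvModA - (cur.getD K 0 + kv.2 * c)) * f K := by
        ring
      rw [expand]
      have hz : Int.ModEq pvModA
          ((PySem.Int.mod (cur.getD K 0 + kv.2 * c) pvModA - (cur.getD K 0 + kv.2 * c)) * f K) 0 := by
        have := ((pvModEq_mod (cur.getD K 0 + kv.2 * c)).sub_right (cur.getD K 0 + kv.2 * c)).mul_right (f K)
        simpa using this
      have step1 : Int.ModEq pvModA
          ((pvW f cur.items + (kv.2 * (c * f K)
              + (List.map (fun kv => kv.2 * (if (Int.gcd kv.1 x == 1) = true then c * f (kv.1 * x) else 0)) t).sum))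
            + (PySem.Int.mod (cur.getD K 0 + kv.2 * c) pvModA - (cur.getD K 0 + kv.2 * c)) * f K)
          ((pvW f cur.items + (kv.2 * (c * f K)
              + (List.map (fun kv => kv.2 * (if (Int.gcd kv.1 x == 1) = true then c * f (kv.1 * x) else 0)) t).sum)) + 0) :=
        (Int.ModEq.refl _).add hz
      simpa using step1
    · simp only [hg, Bool.false_eq_true, if_false, mul_zero, zero_add]
      exact ih cur hnd

theorem pvW_step (f : Int → Int) (x c : Int) (pre : PySem.Dict Int Int) (h : pre.keys.Nodup) :
    Int.ModEq pvModA (pvW f (pvStep x c pre).items)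
      (pvW f pre.items
        + (pre.items.map (fun kv => kv.2 * (if Int.gcd kv.1 x == 1 then c * f (kv.1 * x) else 0))).sum
        + c * f x) := by
  unfold pvStep
  have hcur : ∀ curD : PySem.Dict Int Int, curD.keys.Nodup →
      pvW f (curD.insert x (curD.getD x 0 + c)).items = pvW f curD.items + c * f x := by
    intro curD hD
    rw [pvW_insert f curD hD x _]
    ring
  set curF := pre.items.foldl (fun cur (kv : Int × Int) =>
    if Int.gcd kv.1 x == 1 then
      let cur1 := cur.insert (kv.1 * x) (cur.getD (kv.1 * x) 0 + kv.2 * c)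
      cur1.insert (kv.1 * x) (PySem.Int.mod (cur1.getD (kv.1 * x) 0) pvModA)
    else cur) pre with hcurF
  have hndF : curF.keys.Nodup := by
    rw [hcurF]
    exact pvNodupFold _ (fun d b hd => pvNodupInnerStep x c d b hd) pre.items pre h
  rw [hcur curF hndF]
  have := (pvW_innerFold f x c pre.items pre h).add_right (c * f x)
  rw [hcurF]
  exact this

theorem pvMain : ∀ (L : List (Int × Int)) (d : PySem.Dict Int Int), d.keys.Nodup →
    Int.ModEq pvModA ((pvOuter L d).values.sum)
      (pvW (pvDfsB (L.filter (fun xc => pvSqfB.contains xc.1))) d.items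
        + pvDfsB (L.filter (fun xc => pvSqfB.contains xc.1)) 1 - 1) := by
  intro L
  induction L with
  | nil =>
    intro d _
    have h1 : pvW (fun _ : Int => (1 : Int)) d.items = d.values.sum := by
      simp [pvW, PySem.Dict.values]
    simp only [List.filter_nil, pvOuter, List.foldl_nil, pvDfsB]
    rw [h1]
    have h2 : d.values.sum + 1 - 1 = d.values.sum := by ring
    rw [h2]
  | cons xc L ih =>
    obtain ⟨x, c⟩ := xc
    intro d hd
    simp only [pvOuter, List.foldl_cons, List.filter_cons]
    by_cases hc : pvSqfB.contains x = true
    · simp only [hc, if_true]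
      set F := L.filter (fun xc => pvSqfB.contains xc.1) with hF
      have hIH := ih (pvStep x c d) (pvNodupStep x c d hd)
      simp only [pvOuter] at hIH
      have hgpt : ∀ k, Int.ModEq pvModA (pvDfsB ((x, c) :: F) k)
          (pvDfsB F k + (if Int.gcd k x == 1 then c * pvDfsB F (k * x) else 0)) := by
        intro k
        show Int.ModEq pvModA
          (if Int.gcd k x == 1 then PySem.Int.mod (pvDfsB F k + c * pvDfsB F (k * x)) pvModA else pvDfsB F k) _
        by_cases hg : (Int.gcd k x == 1) = true
        · simp only [hg, if_true]
          exact pvModEq_mod _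
        · simp only [hg, Bool.false_eq_true, if_false, add_zero]
          exact Int.ModEq.refl _
      have hW := pvW_step (pvDfsB F) x c d hd
      have hWc : Int.ModEq pvModA (pvW (pvDfsB ((x, c) :: F)) d.items)
          (pvW (pvDfsB F) d.items
            + (d.items.map (fun kv => kv.2 * (if Int.gcd kv.1 x == 1 then c * pvDfsB F (kv.1 * x) else 0))).sum) := by
        have h1 := pvSumModEq pvModA
          (fun kv => kv.2 * pvDfsB ((x, c) :: F) kv.1)
          (fun kv => kv.2 * (pvDfsB F kv.1 + (if Int.gcd kv.1 x == 1 then c * pvDfsB F (kv.1 * x) else 0)))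
          d.items (fun p _ => (hgpt p.1).mul_left p.2)
        have h2 : (d.items.map (fun kv => kv.2 * (pvDfsB F kv.1
              + (if Int.gcd kv.1 x == 1 then c * pvDfsB F (kv.1 * x) else 0)))).sum
            = pvW (pvDfsB F) d.items
              + (d.items.map (fun kv => kv.2 * (if Int.gcd kv.1 x == 1 then c * pvDfsB F (kv.1 * x) else 0))).sum := by
          simp only [mul_add, pvW]
          exact PySem.List.sum_map_add_int d.items _ _
        rw [h2] at h1
        exact h1
      have hg1 : Int.ModEq pvModA (pvDfsB ((x, c) :: F) 1) (pvDfsB F 1 + c * pvDfsB F x) := by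
        have h1 := hgpt 1
        rw [if_pos (by simp [Int.one_gcd]), one_mul] at h1
        exact h1
      -- chain both sides to the common value
      refine hIH.trans ?_
      have hside := ((hW.add_right (pvDfsB F 1)).sub_right 1)
      refine hside.trans ?_
      have hback := ((hWc.add (hg1)).sub_right 1).symm
      have e : pvW (pvDfsB F) d.items
            + (d.items.map (fun kv => kv.2 * (if Int.gcd kv.1 x == 1 then c * pvDfsB F (kv.1 * x) else 0))).sum
            + c * pvDfsB F x + pvDfsB F 1 - 1
          = pvW (pvDfsB F) d.items
            + (d.items.map (fun kv => kv.2 * (if Int.gcd kv.1 x == 1 then c * pvDfsB F (kv.1 * x) else 0))).sum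
            + (pvDfsB F 1 + c * pvDfsB F x) - 1 := by ring
      rw [e]
      exact hback
    · simp only [hc, Bool.false_eq_true, if_false]
      exact ih d hd

-- ===== VERDICT (by name: the statement is the Claim_ definition above) =====
theorem lc_6334_spec : Claim_equal_lc_6334 := by
  unfold Claim_equal_lc_6334
  intro nums _
  unfold Spec_lc_6334
  simp only [lc_6334, lc_6334_alt]
  rw [pvOuterA_eq (PySem.Dict.counter nums) (PySem.Dict.nodup_keys_counter nums)
      PySem.Dict.empty (by simp [PySem.Dict.keys_empty])]
  have hM := pvMain (PySem.Dict.counter nums).items PySem.Dict.empty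
    (by simp [PySem.Dict.keys_empty])
  have hW0 : pvW (pvDfsB ((PySem.Dict.counter nums).items.filter
      (fun xc => pvSqfB.contains xc.1))) (PySem.Dict.empty : PySem.Dict Int Int).items = 0 := by
    simp [pvW, PySem.Dict.empty]
  rw [hW0, zero_add] at hM
  set p := PySem.Int.powMod 2 ((PySem.Dict.counter nums).getD 1 0).toNat pvModA with hp
  rw [PySem.Int.mod_eq_emod_of_pos pvModA_pos, PySem.Int.mod_eq_emod_of_pos pvModA_pos]
  exact ((hM.mul_right p).add_right p).sub_right 1
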